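-- pv_equiv track=rewrite | github.com/shaun-gentilin/movie_recommendation_ai | movie_recommender.py | update_learning
-- ===== SOURCE A (Python) =====
-- def update_learning(learning_dict : dict, desc, genre, unique_words : set):
--     import string
--     if genre not in learning_dict:
--         learning_dict[genre] = {}
--     desc_words = desc.split()
--     for word in desc_words:
--         #remove all punctiation from the word to avoid the same word being counted as different ones
--         clean_word = word.translate(str.maketrans('', '', string.punctuation))
--         unique_words.add(clean_word) #keep track of unique features in training data
--         if clean_word in learning_dict[genre]:
--             learning_dict[genre][clean_word] += 1
--         else:
--             learning_dict[genre][clean_word] = 1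
--     return learning_dict, unique_words
-- ===== SOURCE B (Python) =====
-- def update_learning(learning_dict: dict, desc, genre, unique_words: set):
--     import string
--     table = str.maketrans('', '', string.punctuation)
--     cleaned = [w.translate(table) for w in desc.split()]
--     # distinct cleaned words in first-occurrence order
--     seen = []
--     for w in cleaned:
--         if w not in seen:
--             seen.append(w)
--     unique_words.update(seen)
--     if genre not in learning_dict:
--         learning_dict[genre] = {}
--     g = learning_dict[genre]
--     for w in seen:
--         g[w] = g.get(w, 0) + cleaned.count(w)
--     return learning_dict, unique_words
-- ===== Notes on version B (the rewrite author's own statement) =====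
-- stated objective: alternative
-- what changed: A counts incrementally, bumping a per-word tally as it walks the description once; B never keeps a running tally: it first deduplicates the cleaned words into a first-occurrence list, then for each distinct word computes its total with a full cleaned.count(w) scan and adds that once into the genre dict.
import Mathlib
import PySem

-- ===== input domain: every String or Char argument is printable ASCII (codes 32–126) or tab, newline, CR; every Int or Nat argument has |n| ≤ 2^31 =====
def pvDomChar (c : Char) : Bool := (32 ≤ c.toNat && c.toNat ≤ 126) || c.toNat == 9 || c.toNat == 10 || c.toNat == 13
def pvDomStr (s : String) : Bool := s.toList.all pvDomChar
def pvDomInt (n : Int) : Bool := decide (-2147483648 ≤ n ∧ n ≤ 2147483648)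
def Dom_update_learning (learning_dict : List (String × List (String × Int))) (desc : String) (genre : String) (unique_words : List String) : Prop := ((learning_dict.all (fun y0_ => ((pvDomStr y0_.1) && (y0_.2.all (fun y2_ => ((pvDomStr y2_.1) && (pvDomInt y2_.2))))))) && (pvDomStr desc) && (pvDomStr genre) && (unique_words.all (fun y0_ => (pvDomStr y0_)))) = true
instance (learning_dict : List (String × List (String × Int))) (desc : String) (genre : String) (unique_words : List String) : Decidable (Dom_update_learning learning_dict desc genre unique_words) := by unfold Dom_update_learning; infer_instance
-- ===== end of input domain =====

-- B replaces A's single-pass incremental tallying by a dedup pass (distinct cleaned words, first occurrence order)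
-- followed by a full cleaned.count(w) scan per distinct word; both Pythons mutate learning_dict and unique_words
-- in place and return them — the equivalence proved here is about the return value.

-- string.punctuation; pvClean is an exact port of word.translate(str.maketrans('', '', string.punctuation))
-- on the ASCII domain: it deletes exactly the punctuation characters.
def pvPunct : List Char := "!\"#$%&'()*+,-./:;<=>?@[\\]^_`{|}~".toList
def pvClean (w : String) : String := String.ofList (w.toList.filter (fun c => !pvPunct.contains c))

-- ===== PORT A =====
def update_learning (learning_dict : List (String × List (String × Int))) (desc : String) (genre : String) (unique_words : List String) : (List (String × List (String × Int))) × List String :=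
  let d0 : PySem.Dict String (List (String × Int)) := ⟨learning_dict⟩
  let d1 := if d0.contains genre then d0 else d0.insert genre []
  let r := (PySem.Str.split₀ desc).foldl
    (fun (st : PySem.Dict String (List (String × Int)) × PySem.Set String) word =>
      let cw := pvClean word
      let u := PySem.Set.add st.2 cw
      let g : PySem.Dict String Int := ⟨st.1.getD genre []⟩
      let g' := if g.contains cw then g.insert cw (g.getD cw 0 + 1) else g.insert cw 1
      (st.1.insert genre g'.items, u))
    (d1, unique_words)
  (r.1.items, r.2)

-- ===== PORT B =====
def update_learning_alt (learning_dict : List (String × List (String × Int))) (desc : String) (genre : String) (unique_words : List String) : (List (String × List (String × Int))) × List String :=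
  let cleaned := (PySem.Str.split₀ desc).map pvClean
  -- seen: distinct cleaned words in first-occurrence order ('if w not in seen: seen.append(w)')
  let seen := PySem.Set.ofList cleaned
  let uw' := PySem.Set.update unique_words seen
  let d0 : PySem.Dict String (List (String × Int)) := ⟨learning_dict⟩
  let d1 := if d0.contains genre then d0 else d0.insert genre []
  let g0 : PySem.Dict String Int := ⟨d1.getD genre []⟩
  let g' := seen.foldl (fun g w => g.insert w (g.getD w 0 + (cleaned.count w : Int))) g0
  ((d1.insert genre g'.items).items, uw')

-- ===== PRECONDITION & SPEC =====
-- Pre_ excludes only association lists with a duplicated genre key: such a list does not represent any Python dict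
-- (a real dict cannot have duplicate keys), so A is never run on one.
def Pre_update_learning (learning_dict : List (String × List (String × Int))) (desc : String) (genre : String) (unique_words : List String) : Prop :=
  (learning_dict.map Prod.fst).Nodup
instance (learning_dict : List (String × List (String × Int))) (desc : String) (genre : String) (unique_words : List String) : Decidable (Pre_update_learning learning_dict desc genre unique_words) := by unfold Pre_update_learning; infer_instance
def pvWitness_update_learning : (List (String × List (String × Int))) × String × String × List String :=
  ([("a", [("w", 1)])], "w, w! x", "a", ["w"])

def Spec_update_learning (learning_dict : List (String × List (String × Int))) (desc : String) (genre : String) (unique_words : List String) (out : (List (String × List (String × Int))) × List String) : Prop := out = update_learning_alt learning_dict desc genre unique_words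
instance (learning_dict : List (String × List (String × Int))) (desc : String) (genre : String) (unique_words : List String) (out : (List (String × List (String × Int))) × List String) : Decidable (Spec_update_learning learning_dict desc genre unique_words out) := by unfold Spec_update_learning; infer_instance

-- ===== CLAIM (what is proved, stated in full; the proofs are below) =====
def Claim_equal_update_learning : Prop := ∀ (learning_dict : List (String × List (String × Int))) (desc : String) (genre : String) (unique_words : List String), Dom_update_learning learning_dict desc genre unique_words → Pre_update_learning learning_dict desc genre unique_words → Spec_update_learning learning_dict desc genre unique_words (update_learning learning_dict desc genre unique_words)

-- ===== LEMMAS AND PROOFS =====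
theorem pv_getD_of_not_contains {ν : Type} (d : PySem.Dict String ν) (k : String) (v : ν)
    (h : d.contains k = false) : d.getD k v = v := by
  simp [PySem.Dict.contains, List.any_eq_false] at h
  have : List.find? (fun p => p.1 == k) d.items = none := by
    apply List.find?_eq_none.mpr
    intro p hp
    simpa using h p.1 p.2 hp
  simp [PySem.Dict.getD, PySem.Dict.get?, this]

theorem pv_contains_insert {ν : Type} (d : PySem.Dict String ν) (k k' : String) (v : ν) :
    (d.insert k v).contains k' = (k' == k || d.contains k') := by
  by_cases hc : d.contains k = true
  · have hck : k' = k → d.contains k' = true := fun h => h ▸ hc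
    simp only [PySem.Dict.insert, PySem.Dict.contains] at *
    rw [if_pos hc]
    simp only [List.any_map]
    by_cases hk : k' = k
    · subst hk
      simp only [beq_self_eq_true, Bool.true_or]
      rw [List.any_eq_true] at hc ⊢
      obtain ⟨p, hp, hpk⟩ := hc
      exact ⟨p, hp, by simp [Function.comp, hpk]⟩
    · have : ∀ p : String × ν, ((fun p => p.1 == k') ∘ (fun p => if p.1 == k then (k, v) else p)) p = (fun p : String × ν => p.1 == k') p := by
        intro p
        by_cases h2 : p.1 = k <;> simp [Function.comp, h2, hk, Ne.symm hk]
      rw [List.any_congr rfl this]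
      simp [hk]
  · simp only [PySem.Dict.insert, PySem.Dict.contains] at *
    rw [if_neg hc, List.any_append]
    by_cases hk : k' = k
    · simp [hk]
    · have h1 : (k' == k) = false := by simp [hk]
      have h2 : (k == k') = false := by simp [Ne.symm hk]
      simp [h1, h2]

theorem pv_insert_insert {ν : Type} (d : PySem.Dict String ν) (k : String) (a b : ν) :
    (d.insert k a).insert k b = d.insert k b := by
  have hci := pv_contains_insert d k k a
  by_cases hc : d.contains k = true
  · simp only [PySem.Dict.insert, hc, if_pos, if_true] at *
    rw [if_pos (by simpa using hci)]
    congr 1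
    simp only [List.map_map]
    apply List.map_congr_left
    intro p _
    by_cases h2 : p.1 = k <;> simp [Function.comp, h2]
  · have h1 : d.insert k a = ⟨d.items ++ [(k, a)]⟩ := by
      simp only [PySem.Dict.insert, if_neg hc]
    have h2 : ((⟨d.items ++ [(k, a)]⟩ : PySem.Dict String ν).contains k) = true := by
      rw [← h1]; simp [hci, hc]
    simp only [PySem.Dict.insert, h1, h2, if_true, if_neg hc]
    congr 1
    simp only [PySem.Dict.items, List.map_append]
    simp only [PySem.Dict.contains, List.any_eq_false, Bool.not_eq_true] at hc
    have he : List.map (fun p : String × ν => if (p.1 == k) = true then (k, b) else p) d.items = List.map id d.items := by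
      apply List.map_congr_left
      intro p hp
      simp [hc p hp]
    rw [he, List.map_id]
    simp

theorem pv_split_of_contains {ν : Type} {l : List (String × ν)} {x : String}
    (hn : (l.map Prod.fst).Nodup) (hc : (⟨l⟩ : PySem.Dict String ν).contains x = true) :
    ∃ l1 c l2, l = l1 ++ (x, c) :: l2 ∧ (∀ p ∈ l1, p.1 ≠ x) ∧ (∀ p ∈ l2, p.1 ≠ x) := by
  induction l with
  | nil => simp [PySem.Dict.contains] at hc
  | cons p t ih =>
    by_cases hpx : p.1 = x
    · refine ⟨[], p.2, t, ?_, by simp, ?_⟩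
      · have : p = (x, p.2) := by rw [← hpx]
        simp [← this]
      · simp only [List.map_cons, List.nodup_cons] at hn
        intro q hq hqx
        exact hn.1 (hpx ▸ hqx ▸ List.mem_map_of_mem hq)
    · have hct : (⟨t⟩ : PySem.Dict String ν).contains x = true := by
        simp only [PySem.Dict.contains] at hc ⊢
        simpa [hpx] using hc
      obtain ⟨l1, c, l2, he, h1, h2⟩ := ih (by simp_all) hct
      exact ⟨p :: l1, c, l2, by simp [he], by simpa [hpx] using h1, h2⟩

theorem pv_getD_split {ν : Type} (l1 : List (String × ν)) (x : String) (c : ν) (l2 : List (String × ν)) (v0 : ν)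
    (h1 : ∀ p ∈ l1, p.1 ≠ x) :
    (⟨l1 ++ (x, c) :: l2⟩ : PySem.Dict String ν).getD x v0 = c := by
  have : List.find? (fun p => p.1 == x) (l1 ++ (x, c) :: l2) = some (x, c) := by
    rw [List.find?_append]
    have : List.find? (fun p => p.1 == x) l1 = none :=
      List.find?_eq_none.mpr (fun p hp => by simp [h1 p hp])
    simp [this]
  simp [PySem.Dict.getD, PySem.Dict.get?, this]

theorem pv_insert_getD_self_of_nodup {ν : Type} (d : PySem.Dict String ν) (k : String) (v0 : ν)
    (hn : (d.items.map Prod.fst).Nodup) (hc : d.contains k = true) :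
    d.insert k (d.getD k v0) = d := by
  obtain ⟨l1, c, l2, he, h1, h2⟩ := pv_split_of_contains (l := d.items) hn (by cases d; exact hc)
  have hd : d = ⟨l1 ++ (k, c) :: l2⟩ := by cases d; simpa using he
  subst hd
  rw [pv_getD_split _ _ _ _ _ h1]
  simp only [PySem.Dict.insert, hc, if_true]
  congr 1
  simp only [PySem.Dict.items, List.map_append, List.map_cons]
  have e1 : List.map (fun p : String × ν => if p.1 = k then (k, c) else p) l1 = List.map id l1 :=
    List.map_congr_left (fun p hp => by simp [h1 p hp])
  have e2 : List.map (fun p : String × ν => if p.1 = k then (k, c) else p) l2 = List.map id l2 :=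
    List.map_congr_left (fun p hp => by simp [h2 p hp])
  simp [e1, e2]

def pvStep1 (g : PySem.Dict String Int) (w : String) : PySem.Dict String Int :=
  g.insert w (g.getD w 0 + 1)
def pvStepC (g : PySem.Dict String Int) (c : String × Int) : PySem.Dict String Int :=
  g.insert c.1 (g.getD c.1 0 + c.2)
def pvFc (l : List (String × Int)) (g : PySem.Dict String Int) : PySem.Dict String Int :=
  l.foldl pvStepC g
def pvMEq (x : String) : List (String × Int) → List (String × Int) → Prop :=
  List.Forall₂ (fun p q => p.1 = q.1 ∧ (p.1 ≠ x → p = q))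
def pvCanon (x : String) (d : PySem.Dict String Int) : Prop :=
  ∀ p ∈ d.items, p.1 = x → p.2 = d.getD x 0

theorem pv_meq_refl (x : String) (l : List (String × Int)) : pvMEq x l l :=
  List.forall₂_same.mpr fun _ _ => ⟨rfl, fun _ => rfl⟩

theorem pv_meq_keys {x : String} {l1 l2 : List (String × Int)} (h : pvMEq x l1 l2) :
    l1.map Prod.fst = l2.map Prod.fst := by
  induction h with
  | nil => rfl
  | cons hpq _ ih => simp [hpq.1, ih]

theorem pv_meq_find {x k : String} {l1 l2 : List (String × Int)} (h : pvMEq x l1 l2)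
    (hk : k ≠ x) : l1.find? (fun p => p.1 == k) = l2.find? (fun p => p.1 == k) := by
  induction h with
  | nil => rfl
  | @cons a b t1 t2 hpq _ ih =>
    by_cases hak : a.1 = k
    · have hab : a = b := hpq.2 (by rw [hak]; exact hk)
      simp [List.find?_cons, hak, ← hab]
    · have hbk : b.1 ≠ k := hpq.1 ▸ hak
      have ha' : (a.1 == k) = false := by simpa using hak
      have hb' : (b.1 == k) = false := by simpa using hbk
      simp [List.find?_cons, ha', hb', ih]

theorem pv_meq_getD {x k : String} {d1 d2 : PySem.Dict String Int}
    (h : pvMEq x d1.items d2.items) (hk : k ≠ x) : d1.getD k 0 = d2.getD k 0 := by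
  simp [PySem.Dict.getD, PySem.Dict.get?, pv_meq_find h hk]

theorem pv_meq_contains {x k : String} {d1 d2 : PySem.Dict String Int}
    (h : pvMEq x d1.items d2.items) : d1.contains k = d2.contains k := by
  have hkeys := pv_meq_keys h
  simp only [PySem.Dict.contains]
  have e : ∀ l : List (String × Int), (l.any fun p => p.1 == k) = ((l.map Prod.fst).any fun a => a == k) := by
    intro l; rw [List.any_map]; rfl
  rw [e, e, hkeys]

theorem pv_meq_eq_of_no_x {x : String} {l1 l2 : List (String × Int)} (h : pvMEq x l1 l2)
    (hx : ∀ p ∈ l1, p.1 ≠ x) : l1 = l2 := by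
  induction h with
  | nil => rfl
  | @cons a b t1 t2 hpq _ ih =>
    have := hpq.2 (hx a (by simp))
    simp [this, ih (fun p hp => hx p (by simp [hp]))]

theorem pv_meq_map_insert {x : String} {l1 l2 : List (String × Int)} (h : pvMEq x l1 l2) (w : Int) :
    List.map (fun p : String × Int => if p.1 = x then (x, w) else p) l1
      = List.map (fun p : String × Int => if p.1 = x then (x, w) else p) l2 := by
  induction h with
  | nil => rfl
  | @cons a b t1 t2 hpq _ ih =>
    by_cases hax : a.1 = x
    · have hbx : b.1 = x := hpq.1 ▸ hax
      simp [hax, hbx, ih]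
    · have hbx : b.1 ≠ x := hpq.1 ▸ hax
      have hab := hpq.2 hax
      simp [hax, hbx, hab, ih]

theorem pv_meq_insert_same {x : String} {d1 d2 : PySem.Dict String Int}
    (h : pvMEq x d1.items d2.items) (w : Int) : d1.insert x w = d2.insert x w := by
  have hc := pv_meq_contains (k := x) h
  by_cases hx : d1.contains x = true
  · simp only [PySem.Dict.insert, hx, ← hc, if_true]
    congr 1
    have e : (fun p : String × Int => if (p.1 == x) = true then (x, w) else p)
        = (fun p : String × Int => if p.1 = x then (x, w) else p) := by
      funext p; simp
    rw [e]
    exact pv_meq_map_insert h w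
  · have hnox : ∀ p ∈ d1.items, p.1 ≠ x := by
      simp only [PySem.Dict.contains, List.any_eq_false, Bool.not_eq_true] at hx
      intro p hp
      simpa using hx p hp
    have he : d1.items = d2.items := pv_meq_eq_of_no_x h hnox
    cases d1; cases d2; simp_all [PySem.Dict.insert]

theorem pv_meq_map_step {x k : String} (hkx : k ≠ x) (val : Int) {l1 l2 : List (String × Int)}
    (h : pvMEq x l1 l2) :
    pvMEq x (l1.map (fun p => if p.1 == k then (k, val) else p))
           (l2.map (fun p => if p.1 == k then (k, val) else p)) := by
  induction h with
  | nil => exact List.Forall₂.nil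
  | @cons a b t1 t2 hpq ht ih =>
    simp only [List.map_cons]
    refine List.Forall₂.cons ?_ ih
    by_cases hak : a.1 = k
    · have hab : a = b := hpq.2 (hak ▸ hkx)
      have ha' : (a.1 == k) = true := by simpa using hak
      have hb' : (b.1 == k) = true := by simpa [← hab] using hak
      simp [ha', hb']
    · have hbk : b.1 ≠ k := hpq.1 ▸ hak
      have ha' : (a.1 == k) = false := by simpa using hak
      have hb' : (b.1 == k) = false := by simpa using hbk
      simp only [ha', hb', if_neg, Bool.false_eq_true]
      exact hpq

theorem pv_meq_append {x : String} {l1 l2 : List (String × Int)} (h : pvMEq x l1 l2)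
    {p q : String × Int} (hr : p.1 = q.1 ∧ (p.1 ≠ x → p = q)) :
    pvMEq x (l1 ++ [p]) (l2 ++ [q]) := by
  induction h with
  | nil => exact List.Forall₂.cons hr List.Forall₂.nil
  | cons hpq _ ih => exact List.Forall₂.cons hpq ih

theorem pv_meq_step {x : String} {d1 d2 : PySem.Dict String Int}
    (h : pvMEq x d1.items d2.items) (c : String × Int) (hc : c.1 ≠ x) :
    pvMEq x (pvStepC d1 c).items (pvStepC d2 c).items := by
  obtain ⟨k, v⟩ := c
  simp only at hc
  have hgd : d1.getD k 0 = d2.getD k 0 := pv_meq_getD h hc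
  have hcont := pv_meq_contains (k := k) h
  simp only [pvStepC]
  rw [hgd]
  by_cases hk : d1.contains k = true
  · simp only [PySem.Dict.insert, hk, ← hcont, if_true]
    exact pv_meq_map_step hc _ h
  · have hk2 : d2.contains k = true → False := fun h2 => hk (hcont ▸ h2)
    simp only [PySem.Dict.insert, hk, ← hcont, if_neg, Bool.false_eq_true]
    exact pv_meq_append h ⟨rfl, fun _ => rfl⟩

theorem pv_meq_fold {x : String} {l : List (String × Int)} (hl : ∀ p ∈ l, p.1 ≠ x)
    {d1 d2 : PySem.Dict String Int} (h : pvMEq x d1.items d2.items) :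
    pvMEq x (pvFc l d1).items (pvFc l d2).items := by
  induction l generalizing d1 d2 with
  | nil => exact h
  | cons c t ih =>
    exact ih (fun p hp => hl p (by simp [hp]))
      (pv_meq_step h c (hl c (by simp)))

theorem pv_meq_insert_init (x : String) (e : PySem.Dict String Int) (v w : Int) :
    pvMEq x (e.insert x v).items (e.insert x w).items := by
  by_cases hc : e.contains x = true
  · simp only [PySem.Dict.insert, hc, if_true]
    induction e.items with
    | nil => exact List.Forall₂.nil
    | cons p t ih =>
      simp only [List.map_cons]
      refine List.Forall₂.cons ?_ ih
      by_cases hpx : p.1 = x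
      · have h' : (p.1 == x) = true := by simpa using hpx
        simp [h']
      · have h' : (p.1 == x) = false := by simpa using hpx
        simp only [h', Bool.false_eq_true, if_neg]
        exact ⟨rfl, fun _ => rfl⟩
  · have h1 : e.insert x v = ⟨e.items ++ [(x, v)]⟩ := by simp only [PySem.Dict.insert, if_neg hc]
    have h2 : e.insert x w = ⟨e.items ++ [(x, w)]⟩ := by simp only [PySem.Dict.insert, if_neg hc]
    rw [h1, h2]
    exact pv_meq_append (pv_meq_refl x e.items) ⟨rfl, fun hx => absurd rfl hx⟩

theorem pv_getD_fold_of_ne {x : String} {l : List (String × Int)} (hl : ∀ p ∈ l, p.1 ≠ x)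
    (d : PySem.Dict String Int) : (pvFc l d).getD x 0 = d.getD x 0 := by
  induction l generalizing d with
  | nil => rfl
  | cons c t ih =>
    rw [show pvFc (c :: t) d = pvFc t (pvStepC d c) from rfl,
        ih (fun p hp => hl p (by simp [hp]))]
    exact PySem.Dict.getD_insert_of_ne _ _ _ (Ne.symm (hl c (by simp)))

theorem pv_contains_fold {x : String} (l : List (String × Int)) (d : PySem.Dict String Int)
    (h : d.contains x = true) : (pvFc l d).contains x = true := by
  induction l generalizing d with
  | nil => exact h
  | cons c t ih =>
    refine ih _ ?_
    simp only [pvStepC]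
    rw [pv_contains_insert]
    simp [h]

theorem pv_canon_insert_self (x : String) (e : PySem.Dict String Int) (v : Int) :
    pvCanon x (e.insert x v) := by
  intro p hp hpx
  rw [PySem.Dict.getD_insert_self]
  by_cases hc : e.contains x = true
  · simp only [PySem.Dict.insert, hc, if_true, PySem.Dict.items] at hp
    obtain ⟨q, hq, hqe⟩ := List.mem_map.mp hp
    by_cases hqx : q.1 = x
    · rw [← hqe]; simp [hqx]
    · have : (q.1 == x) = false := by simpa using hqx
      rw [← hqe] at hpx ⊢
      simp only [this, Bool.false_eq_true, if_neg] at hpx ⊢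
      exact absurd hpx hqx
  · have h1 : e.insert x v = ⟨e.items ++ [(x, v)]⟩ := by simp only [PySem.Dict.insert, if_neg hc]
    rw [h1] at hp
    simp only [PySem.Dict.items, List.mem_append, List.mem_singleton] at hp
    rcases hp with hp | hp
    · simp only [PySem.Dict.contains, List.any_eq_false, Bool.not_eq_true] at hc
      have := hc p hp
      simp [hpx] at this
    · simp [hp]

theorem pv_canon_step {x : String} {d : PySem.Dict String Int} (h : pvCanon x d)
    (c : String × Int) (hc : c.1 ≠ x) : pvCanon x (pvStepC d c) := by
  intro p hp hpx
  have hgd : (pvStepC d c).getD x 0 = d.getD x 0 := by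
    simp only [pvStepC]
    exact PySem.Dict.getD_insert_of_ne _ _ _ (Ne.symm hc)
  rw [hgd]
  simp only [pvStepC, PySem.Dict.insert] at hp
  by_cases hk : d.contains c.1 = true
  · simp only [hk, if_true, PySem.Dict.items] at hp
    obtain ⟨q, hq, hqe⟩ := List.mem_map.mp hp
    by_cases hqk : q.1 = c.1
    · have : (q.1 == c.1) = true := by simpa using hqk
      rw [← hqe] at hpx
      simp [this] at hpx
      exact absurd hpx.symm (fun he => hc he.symm)
    · have : (q.1 == c.1) = false := by simpa using hqk
      rw [← hqe] at hpx ⊢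
      simp only [this, Bool.false_eq_true, if_neg] at hpx ⊢
      exact h q hq hpx
  · rw [if_neg hk] at hp
    simp only [PySem.Dict.items, List.mem_append, List.mem_singleton] at hp
    rcases hp with hp | hp
    · exact h p hp hpx
    · rw [hp] at hpx; exact absurd hpx hc

theorem pv_canon_fold {x : String} {l : List (String × Int)} (hl : ∀ p ∈ l, p.1 ≠ x)
    {d : PySem.Dict String Int} (h : pvCanon x d) : pvCanon x (pvFc l d) := by
  induction l generalizing d with
  | nil => exact h
  | cons c t ih =>
    exact ih (fun p hp => hl p (by simp [hp])) (pv_canon_step h c (hl c (by simp)))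

theorem pv_canon_reinsert {x : String} {d : PySem.Dict String Int}
    (hc : d.contains x = true) (h : pvCanon x d) : d.insert x (d.getD x 0) = d := by
  simp only [PySem.Dict.insert, hc, if_true]
  have : List.map (fun p : String × Int => if (p.1 == x) = true then (x, d.getD x 0) else p) d.items
      = List.map id d.items := by
    apply List.map_congr_left
    rintro ⟨a, b⟩ hp
    by_cases hpx : a = x
    · have hb : ((a, b).1 == x) = true := by simpa using hpx
      have hv := h (a, b) hp hpx
      simp only at hv
      simp [hb, hpx.symm, hv]
    · have hb : ((a, b).1 == x) = false := by simpa using hpx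
      simp [hb]
  rw [this, List.map_id]

theorem pv_branch (g : PySem.Dict String Int) (cw : String) :
    (if g.contains cw then g.insert cw (g.getD cw 0 + 1) else g.insert cw 1) = pvStep1 g cw := by
  by_cases hc : g.contains cw = true
  · simp [hc, pvStep1]
  · simp only [Bool.not_eq_true] at hc
    simp [hc, pvStep1, pv_getD_of_not_contains g cw 0 hc]

theorem pv_dict_eta {ν : Type} (d : PySem.Dict String ν) : (⟨d.items⟩ : PySem.Dict String ν) = d := by
  cases d; rfl

theorem pv_inner (xs : List String) (g : PySem.Dict String Int) :
    xs.foldl pvStep1 g = pvFc (PySem.Dict.counter xs).items g := by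
  induction xs using List.reverseRecOn with
  | nil => rfl
  | append_singleton xs x ih =>
    have hcnt : PySem.Dict.counter (xs ++ [x])
        = (PySem.Dict.counter xs).insert x ((PySem.Dict.counter xs).getD x 0 + 1) := by
      simp [PySem.Dict.counter, List.foldl_append, PySem.Dict.modify]
    rw [List.foldl_append]
    simp only [List.foldl_cons, List.foldl_nil]
    rw [ih, hcnt]
    by_cases hc : (PySem.Dict.counter xs).contains x = true
    · obtain ⟨l1, c, l2, he, h1, h2⟩ := pv_split_of_contains
        (l := (PySem.Dict.counter xs).items)
        (PySem.Dict.nodup_keys_counter xs) (by rw [pv_dict_eta]; exact hc)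
      have hdc : PySem.Dict.counter xs = ⟨l1 ++ (x, c) :: l2⟩ := by
        rw [← he, pv_dict_eta]
      rw [hdc] at *
      have hgd : (⟨l1 ++ (x, c) :: l2⟩ : PySem.Dict String Int).getD x 0 = c :=
        pv_getD_split _ _ _ _ _ h1
      rw [hgd]
      have hins : (⟨l1 ++ (x, c) :: l2⟩ : PySem.Dict String Int).insert x (c + 1)
          = ⟨l1 ++ (x, c + 1) :: l2⟩ := by
        simp only [PySem.Dict.insert, hc, if_true]
        congr 1
        simp only [PySem.Dict.items, List.map_append, List.map_cons, beq_self_eq_true, if_true]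
        have e1 : List.map (fun p : String × Int => if p.1 = x then (x, c + 1) else p) l1 = List.map id l1 :=
          List.map_congr_left (fun p hp => by simp [h1 p hp])
        have e2 : List.map (fun p : String × Int => if p.1 = x then (x, c + 1) else p) l2 = List.map id l2 :=
          List.map_congr_left (fun p hp => by simp [h2 p hp])
        simp [e1, e2]
      rw [hins]
      -- both sides are folds over l1 then the x entry then l2
      have hsplit : ∀ v : Int, pvFc (l1 ++ (x, v) :: l2) g
          = pvFc l2 ((pvFc l1 g).insert x ((pvFc l1 g).getD x 0 + v)) := by
        intro v
        simp only [pvFc, List.foldl_append, List.foldl_cons]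
        rfl
      set G := pvFc l1 g with hG
      set Gx := G.getD x 0 with hGx
      have hval : (pvFc (l1 ++ (x, c) :: l2) g).getD x 0 = Gx + c := by
        rw [hsplit c, pv_getD_fold_of_ne h2, PySem.Dict.getD_insert_self]
      simp only [PySem.Dict.items, pvStep1]
      rw [hval, hsplit c, hsplit (c + 1)]
      have hmeq := pv_meq_fold h2 (pv_meq_insert_init x G (Gx + c) (Gx + c + 1))
      rw [pv_meq_insert_same hmeq (Gx + c + 1)]
      have hcont2 : (pvFc l2 (G.insert x (Gx + (c + 1)))).contains x = true := by
        apply pv_contains_fold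
        rw [pv_contains_insert]
        simp
      have hcanon : pvCanon x (pvFc l2 (G.insert x (Gx + (c + 1)))) :=
        pv_canon_fold h2 (pv_canon_insert_self x G (Gx + (c + 1)))
      have hval2 : (pvFc l2 (G.insert x (Gx + (c + 1)))).getD x 0 = Gx + (c + 1) := by
        rw [pv_getD_fold_of_ne h2, PySem.Dict.getD_insert_self]
      rw [show Gx + c + 1 = Gx + (c + 1) by ring]
      nth_rewrite 2 [← hval2]
      exact pv_canon_reinsert hcont2 hcanon
    · have hc' : (PySem.Dict.counter xs).contains x = false := by simpa using hc
      have hgd0 : (PySem.Dict.counter xs).getD x 0 = 0 := pv_getD_of_not_contains _ _ _ hc'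
      rw [hgd0]
      have hins : (PySem.Dict.counter xs).insert x (0 + 1)
          = ⟨(PySem.Dict.counter xs).items ++ [(x, 0 + 1)]⟩ := by
        simp only [PySem.Dict.insert, hc', Bool.false_eq_true, if_false]
      rw [hins]
      show pvStep1 (pvFc (PySem.Dict.counter xs).items g) x = _
      simp only [pvFc, PySem.Dict.items, List.foldl_append, List.foldl_cons, List.foldl_nil]
      simp [pvStep1, pvStepC]

-- the fold over counter items IS B's fold over the dedup list with full-scan counts
theorem pv_counter_fold_eq_seen (xs : List String) (g : PySem.Dict String Int) :
    pvFc (PySem.Dict.counter xs).items g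
      = (PySem.Set.ofList xs).foldl (fun g w => g.insert w (g.getD w 0 + (xs.count w : Int))) g := by
  rw [pvFc, PySem.Dict.items_counter, List.foldl_map]
  rfl

theorem pv_update_ofList (s : PySem.Set String) (xs : List String) :
    PySem.Set.update s (PySem.Set.ofList xs) = PySem.Set.update s xs := by
  rw [PySem.Set.update_eq_append_filter, PySem.Set.update_eq_append_filter,
    PySem.Set.ofList_ofList]

theorem pv_pair_fold {α β γ : Type} (f : α → γ → α) (h : β → γ → β) (l : List γ) (a : α) (b : β) :
    l.foldl (fun s w => (f s.1 w, h s.2 w)) (a, b) = (l.foldl f a, l.foldl h b) := by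
  induction l generalizing a b with
  | nil => rfl
  | cons c t ih => simp [List.foldl_cons, ih]

theorem pv_outer (genre : String) (ws : List String) (D : PySem.Dict String (List (String × Int)))
    (g : PySem.Dict String Int) :
    ws.foldl (fun D w =>
        D.insert genre ((pvStep1 (⟨D.getD genre []⟩ : PySem.Dict String Int) (pvClean w)).items))
      (D.insert genre g.items)
    = D.insert genre ((ws.foldl (fun g w => pvStep1 g (pvClean w)) g).items) := by
  induction ws generalizing g with
  | nil => rfl
  | cons w t ih =>
    simp only [List.foldl_cons]
    rw [PySem.Dict.getD_insert_self, pv_dict_eta, pv_insert_insert, ih]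

-- ===== VERDICT (by name: the statement is the Claim_ definition above) =====
theorem update_learning_spec : Claim_equal_update_learning := by
  intro ld desc genre uw _ hpre
  unfold Pre_update_learning at hpre
  simp only [Spec_update_learning, update_learning, update_learning_alt]
  set D := (if (⟨ld⟩ : PySem.Dict String (List (String × Int))).contains genre = true
      then (⟨ld⟩ : PySem.Dict String (List (String × Int)))
      else (⟨ld⟩ : PySem.Dict String (List (String × Int))).insert genre []) with hD
  set ws := PySem.Str.split₀ desc with hws
  have hcont : D.contains genre = true := by
    rw [hD]
    by_cases hc : (⟨ld⟩ : PySem.Dict String (List (String × Int))).contains genre = true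
    · rw [if_pos hc]; exact hc
    · have hcb : (ld.any fun p => p.1 == genre) = false := by
        simp only [PySem.Dict.contains] at hc
        exact Bool.eq_false_iff.mpr hc
      rw [if_neg hc]
      simp [PySem.Dict.insert, PySem.Dict.contains, hcb, List.any_append]
  have hnodup : (D.items.map Prod.fst).Nodup := by
    rw [hD]
    by_cases hc : (⟨ld⟩ : PySem.Dict String (List (String × Int))).contains genre = true
    · simpa [hc] using hpre
    · simp only [hc, Bool.false_eq_true, if_false, PySem.Dict.insert, PySem.Dict.items,
        List.map_append, List.nodup_append]
      refine ⟨hpre, by simp, ?_⟩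
      have hcf : ∀ p ∈ ld, (p.1 == genre) = false := by
        have h0 : (ld.any fun p => p.1 == genre) = false := Bool.eq_false_iff.mpr hc
        exact fun p hp => Bool.eq_false_iff.mpr (List.any_eq_false.mp h0 p hp)
      intro a ha b hb
      obtain ⟨p, hp, hpa⟩ := List.mem_map.mp ha
      have hb' : b = genre := by simpa using hb
      have h2 := hcf p hp
      intro hab
      rw [hpa, hab, hb'] at h2
      simp at h2
  have hsplitfold := pv_pair_fold
    (fun Dd w => Dd.insert genre ((pvStep1 (⟨Dd.getD genre []⟩ : PySem.Dict String Int) (pvClean w)).items))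
    (fun s w => PySem.Set.add s (pvClean w)) ws D uw
  simp only [pv_branch]
  rw [hsplitfold]
  have hbase : D.insert genre ((⟨D.getD genre []⟩ : PySem.Dict String Int).items) = D :=
    pv_insert_getD_self_of_nodup D genre [] hnodup hcont
  have hA : ws.foldl (fun Dd w => Dd.insert genre ((pvStep1 (⟨Dd.getD genre []⟩ : PySem.Dict String Int) (pvClean w)).items)) D
      = D.insert genre (((PySem.Set.ofList (ws.map pvClean)).foldl
          (fun g w => g.insert w (g.getD w 0 + ((ws.map pvClean).count w : Int)))
          (⟨D.getD genre []⟩ : PySem.Dict String Int)).items) := by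
    conv_lhs => rw [← hbase]
    rw [pv_outer]
    congr 1
    rw [← List.foldl_map (f := pvClean) (g := pvStep1), pv_inner, pv_counter_fold_eq_seen]
  rw [hA]
  have hset : ws.foldl (fun s w => PySem.Set.add s (pvClean w)) uw
      = PySem.Set.update uw (PySem.Set.ofList (ws.map pvClean)) := by
    rw [pv_update_ofList]
    exact (PySem.Set.update_map_eq_foldl_add ws pvClean uw).symm
  rw [hset]
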